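-- pv_equiv track=rewrite | github.com/Hemantss/Python-Alchemy | chapters/chapter_14_beyond_lists_and_dicts/mini_project.py | group_by_user
-- ===== SOURCE A (Python) =====
-- from collections import Counter
-- import itertools
--
-- def group_by_user(clickstream):
--     """
--     Group product views by user using itertools.groupby.
--     """
--     # Sort by user to group correctly
--     sorted_stream = sorted(clickstream, key=lambda x: x[0])
--     grouped = itertools.groupby(sorted_stream, key=lambda x: x[0])
--     user_data = {}
--     for user, items in grouped:
--         products = [item[1] for item in items]
--         user_data[user] = Counter(products)
--     return user_data
-- ===== SOURCE B (Python) =====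
-- from collections import Counter
--
-- def group_by_user(clickstream):
--     """
--     One-pass grouping: build a Counter per user as the stream is scanned,
--     then sort only the distinct user keys (no full-stream sort, no groupby).
--     """
--     user_data = {}
--     for user, product in clickstream:
--         user_data.setdefault(user, Counter())[product] += 1
--     return {user: user_data[user] for user in sorted(user_data)}
-- ===== Notes on version B (the rewrite author's own statement) =====
-- stated objective: faster
-- what changed: Replaces sort-whole-stream + itertools.groupby + per-group Counter construction by a single pass that increments per-user Counters in one dict, sorting only the distinct user keys at the end.
import Mathlib
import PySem

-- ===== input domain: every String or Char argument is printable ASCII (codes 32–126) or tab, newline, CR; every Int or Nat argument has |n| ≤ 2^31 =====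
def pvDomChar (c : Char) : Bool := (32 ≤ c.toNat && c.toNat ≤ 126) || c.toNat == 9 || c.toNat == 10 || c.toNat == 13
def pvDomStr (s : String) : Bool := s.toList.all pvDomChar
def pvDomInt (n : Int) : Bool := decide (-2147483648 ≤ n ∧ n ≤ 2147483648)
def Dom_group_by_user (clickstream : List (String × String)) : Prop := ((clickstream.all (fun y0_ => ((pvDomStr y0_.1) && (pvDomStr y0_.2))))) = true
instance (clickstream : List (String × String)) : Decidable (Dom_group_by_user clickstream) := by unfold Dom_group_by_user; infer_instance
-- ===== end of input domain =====

-- B replaces A's sort-whole-stream + groupby + per-group Counter by a single pass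
-- building per-user Counters in one dict, sorting only the distinct user keys.

-- ===== PORT A =====
-- Hand port of itertools.groupby over the sorted stream: consecutive runs of equal
-- first components; each run keeps the list of second components (exact here, since
-- A fully consumes each group iterator before advancing).
def pvGroupRuns : List (String × String) → List (String × List String)
  | [] => []
  | (u, p) :: rest =>
      (u, p :: (rest.takeWhile (fun x => x.1 == u)).map (·.2)) ::
      pvGroupRuns (rest.dropWhile (fun x => x.1 == u))
termination_by l => l.length
decreasing_by
  simp only [List.length_cons]
  exact Nat.lt_succ_of_le (List.length_dropWhile_le _ _)

def group_by_user (clickstream : List (String × String)) : List (String × List (String × Int)) :=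
  let sorted_stream := PySem.List.sorted clickstream (fun x => x.1)
  let grouped := pvGroupRuns sorted_stream
  (grouped.foldl
    (fun (d : PySem.Dict String (List (String × Int))) g =>
      d.insert g.1 (PySem.Dict.counter g.2).items)
    PySem.Dict.empty).items

-- ===== PORT B =====
def group_by_user_alt (clickstream : List (String × String)) : List (String × List (String × Int)) :=
  let user_data : PySem.Dict String (PySem.Dict String Int) :=
    clickstream.foldl
      (fun d x => d.modify x.1 PySem.Dict.empty (fun c => c.modify x.2 0 (· + 1)))
      PySem.Dict.empty
  (PySem.List.sorted user_data.keys (fun u => u)).map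
    (fun u => (u, (user_data.getD u PySem.Dict.empty).items))

-- ===== PRECONDITION & SPEC =====
def Spec_group_by_user (clickstream : List (String × String)) (out : List (String × List (String × Int))) : Prop := out = group_by_user_alt clickstream
instance (clickstream : List (String × String)) (out : List (String × List (String × Int))) : Decidable (Spec_group_by_user clickstream out) := by unfold Spec_group_by_user; infer_instance

-- ===== CLAIM (what is proved, stated in full; the proofs are below) =====
def Claim_equal_group_by_user : Prop := ∀ (clickstream : List (String × String)), Dom_group_by_user clickstream → Spec_group_by_user clickstream (group_by_user clickstream)

-- ===== LEMMAS AND PROOFS =====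

-- insertBy (by <) preserves a ≤-sorted list
theorem pv_insertBy_pairwise (x : String × String) (ys : List (String × String))
    (h : List.Pairwise (fun a b => a.1 ≤ b.1) ys) :
    List.Pairwise (fun a b => a.1 ≤ b.1)
      (PySem.List.insertBy (fun a b => decide (a.1 < b.1)) x ys) := by
  induction ys with
  | nil => simp [PySem.List.insertBy]
  | cons y t ih =>
    rw [List.pairwise_cons] at h
    obtain ⟨hy, ht⟩ := h
    simp only [PySem.List.insertBy]
    split_ifs with hlt
    · simp only [decide_eq_true_eq] at hlt
      refine List.Pairwise.cons ?_ (List.Pairwise.cons hy ht)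
      intro z hz
      rcases List.mem_cons.1 hz with rfl | hz
      · exact le_of_lt hlt
      · exact le_trans (le_of_lt hlt) (hy z hz)
    · simp only [decide_eq_true_eq, not_lt] at hlt
      refine List.Pairwise.cons ?_ (ih ht)
      intro z hz
      rcases (PySem.List.mem_insertBy _ _ _ _).1 hz with rfl | hz
      · exact hlt
      · exact hy z hz

-- stability of one insertion: filtering by a key value commutes with insertBy
theorem pv_filter_insertBy (u : String) (x : String × String) (ys : List (String × String))
    (h : List.Pairwise (fun a b => a.1 ≤ b.1) ys) :
    (PySem.List.insertBy (fun a b => decide (a.1 < b.1)) x ys).filter (fun a => a.1 == u)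
      = ys.filter (fun a => a.1 == u) ++ (if x.1 == u then [x] else []) := by
  induction ys with
  | nil => simp [PySem.List.insertBy, List.filter_cons]
  | cons y t ih =>
    rw [List.pairwise_cons] at h
    obtain ⟨hy, ht⟩ := h
    simp only [PySem.List.insertBy]
    by_cases hlt : x.1 < y.1
    · rw [if_pos (by simpa using hlt)]
      by_cases hx : (x.1 == u) = true
      · have hxu : x.1 = u := by simpa using hx
        have hnil : ∀ z ∈ y :: t, ¬((fun (a : String × String) => a.1 == u) z = true) := by
          intro z hz
          simp only [beq_iff_eq]
          intro hzu
          rcases List.mem_cons.1 hz with rfl | hz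
          · rw [hzu, ← hxu] at hlt; exact lt_irrefl _ hlt
          · have := hy z hz
            rw [hzu, ← hxu] at this
            exact absurd (lt_of_lt_of_le hlt this) (lt_irrefl _)
        have h1 : (y :: t).filter (fun a => a.1 == u) = [] := List.filter_eq_nil_iff.2 hnil
        rw [List.filter_cons, h1]
        simp [hx]
      · rw [List.filter_cons]
        simp [hx]
    · rw [if_neg (by simpa using hlt)]
      rw [List.filter_cons, List.filter_cons, ih ht]
      by_cases hyu : (y.1 == u) = true <;> simp [hyu]

-- the insertion-sort fold is stable for key-filters
theorem pv_foldl_insertBy_filter (u : String) :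
    ∀ (cs : List (String × String)) (acc : List (String × String)),
      List.Pairwise (fun a b => a.1 ≤ b.1) acc →
      (cs.foldl (fun acc x => PySem.List.insertBy (fun a b => decide (a.1 < b.1)) x acc) acc).filter
          (fun a => a.1 == u)
        = acc.filter (fun a => a.1 == u) ++ cs.filter (fun a => a.1 == u) := by
  intro cs
  induction cs with
  | nil => intro acc _; simp
  | cons x t ih =>
    intro acc hacc
    simp only [List.foldl_cons]
    rw [ih _ (pv_insertBy_pairwise x acc hacc), pv_filter_insertBy u x acc hacc]
    rw [List.filter_cons]
    split_ifs <;> simp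

-- Python's sorted is stable: filtering by a key value gives back the original sublist
theorem pv_sorted_filter_stable (u : String) (cs : List (String × String)) :
    (PySem.List.sorted cs (fun x => x.1)).filter (fun a => a.1 == u)
      = cs.filter (fun a => a.1 == u) := by
  rw [PySem.List.sorted_eq_foldl_insertBy]
  simpa using pv_foldl_insertBy_filter u cs [] (by simp)

-- in a ≤-sorted list whose keys are all ≥ u, filtering by key = u is takeWhile
theorem pv_filter_eq_takeWhile (u : String) :
    ∀ (l : List (String × String)),
      List.Pairwise (fun a b => a.1 ≤ b.1) l → (∀ x ∈ l, u ≤ x.1) →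
      l.filter (fun a => a.1 == u) = l.takeWhile (fun a => a.1 == u) := by
  intro l
  induction l with
  | nil => intro _ _; rfl
  | cons x t ih =>
    intro hp hge
    rw [List.pairwise_cons] at hp
    obtain ⟨hx, ht⟩ := hp
    by_cases hxu : (x.1 == u) = true
    · rw [List.filter_cons, List.takeWhile_cons,
        ih ht (fun z hz => hge z (List.mem_cons_of_mem _ hz))]
      rw [if_pos hxu, if_pos hxu]
    · have hne : x.1 ≠ u := by simpa using hxu
      have hgt : u < x.1 := lt_of_le_of_ne (hge x List.mem_cons_self) (Ne.symm hne)
      have h1 : t.filter (fun a => a.1 == u) = [] := by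
        apply List.filter_eq_nil_iff.2
        intro z hz
        simp only [beq_iff_eq]
        intro hzu
        have := hx z hz
        rw [hzu] at this
        exact absurd (lt_of_lt_of_le hgt this) (lt_irrefl _)
      rw [List.filter_cons, List.takeWhile_cons]
      simp [hxu, h1]

-- after dropping the u-run of a ≤-sorted list with keys ≥ u, every key exceeds u
theorem pv_dropWhile_keys_gt (u : String) (l : List (String × String))
    (hp : List.Pairwise (fun a b => a.1 ≤ b.1) l) (hge : ∀ x ∈ l, u ≤ x.1) :
    ∀ z ∈ l.dropWhile (fun a => a.1 == u), u < z.1 := by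
  induction l with
  | nil => intro z hz; simp [List.dropWhile] at hz
  | cons x t ih =>
    rw [List.pairwise_cons] at hp
    obtain ⟨hx, ht⟩ := hp
    intro z hz
    rw [List.dropWhile_cons] at hz
    by_cases hxu : (x.1 == u) = true
    · simp only [hxu, if_true] at hz
      exact ih ht (fun y hy => hge y (List.mem_cons_of_mem _ hy)) z hz
    · simp only [hxu] at hz
      have hne : x.1 ≠ u := by simpa using hxu
      have hgt : u < x.1 := lt_of_le_of_ne (hge x List.mem_cons_self) (Ne.symm hne)
      rcases List.mem_cons.1 hz with rfl | hz
      · exact hgt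
      · exact lt_of_lt_of_le hgt (hx z hz)

-- every key of a run of pvGroupRuns is a key of the list
theorem pv_runs_keys_sub : ∀ (l : List (String × String)) (g : String × List String),
    g ∈ pvGroupRuns l → g.1 ∈ l.map (·.1) := by
  intro l
  induction l using pvGroupRuns.induct with
  | case1 => intro g hg; simp [pvGroupRuns] at hg
  | case2 u p rest ih =>
    intro g hg
    rw [pvGroupRuns] at hg
    rcases List.mem_cons.1 hg with rfl | hg
    · simp
    · have := ih g hg
      have hsub : (rest.dropWhile (fun x => x.1 == u)).map (·.1) ⊆ ((u,p) :: rest).map (·.1) := by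
        intro z hz
        simp only [List.map_cons]
        exact List.mem_cons_of_mem _ (List.map_subset _ (List.dropWhile_subset _) hz)
      exact hsub this

-- run keys are strictly increasing on a ≤-sorted list
theorem pv_runs_keys_sorted : ∀ (l : List (String × String)),
    List.Pairwise (fun a b => a.1 ≤ b.1) l →
    List.Pairwise (· < ·) ((pvGroupRuns l).map (·.1)) := by
  intro l
  induction l using pvGroupRuns.induct with
  | case1 => intro _; simp [pvGroupRuns]
  | case2 u p rest ih =>
    intro hp
    rw [List.pairwise_cons] at hp
    obtain ⟨hu, hrest⟩ := hp
    rw [pvGroupRuns, List.map_cons]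
    refine List.Pairwise.cons ?_ (ih (hrest.sublist (List.dropWhile_sublist _)))
    intro k hk
    rcases List.mem_map.1 hk with ⟨g, hg, rfl⟩
    have hmem := pv_runs_keys_sub _ g hg
    rcases List.mem_map.1 hmem with ⟨z, hz, hzq⟩
    rw [← hzq]
    exact pv_dropWhile_keys_gt u rest hrest (fun x hx => hu x hx) z hz

-- every key of the list is a run key
theorem pv_runs_keys_complete : ∀ (l : List (String × String)) (w : String),
    w ∈ l.map (·.1) → w ∈ (pvGroupRuns l).map (·.1) := by
  intro l
  induction l using pvGroupRuns.induct with
  | case1 => intro w hw; simp at hw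
  | case2 u p rest ih =>
    intro w hw
    rcases List.mem_map.1 hw with ⟨z, hz, rfl⟩
    rw [pvGroupRuns, List.map_cons]
    rcases List.mem_cons.1 hz with rfl | hz
    · simp
    · rw [← List.takeWhile_append_dropWhile (p := fun x => x.1 == u) (l := rest)] at hz
      rcases List.mem_append.1 hz with hz | hz
      · have := List.mem_takeWhile_imp hz
        simp only [beq_iff_eq] at this
        simp [this]
      · exact List.mem_cons_of_mem _ (ih _ (List.mem_map_of_mem hz))

-- each run's products are the filter of the whole ≤-sorted list by its key
theorem pv_runs_products : ∀ (l : List (String × String)),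
    List.Pairwise (fun a b => a.1 ≤ b.1) l →
    ∀ g ∈ pvGroupRuns l, g.2 = (l.filter (fun x => x.1 == g.1)).map (·.2) := by
  intro l
  induction l using pvGroupRuns.induct with
  | case1 => intro _ g hg; simp [pvGroupRuns] at hg
  | case2 u p rest ih =>
    intro hp g hg
    rw [List.pairwise_cons] at hp
    obtain ⟨hu, hrest⟩ := hp
    rw [pvGroupRuns] at hg
    rcases List.mem_cons.1 hg with rfl | hg
    · simp only [List.filter_cons]
      rw [pv_filter_eq_takeWhile u rest hrest (fun x hx => hu x hx)]
      simp
    · have hkey := pv_runs_keys_sub _ g hg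
      rcases List.mem_map.1 hkey with ⟨z, hz, hzeq⟩
      have hgt : u < g.1 := by
        rw [← hzeq]
        exact pv_dropWhile_keys_gt u rest hrest (fun x hx => hu x hx) z hz
      have hne : ¬((u == g.1) = true) := by
        simp only [beq_iff_eq]; intro h; rw [h] at hgt; exact lt_irrefl _ hgt
      rw [ih (hrest.sublist (List.dropWhile_sublist _)) g hg]
      have hfilter : ((u, p) :: rest).filter (fun x => x.1 == g.1)
          = (rest.dropWhile (fun x => x.1 == u)).filter (fun x => x.1 == g.1) := by
        rw [List.filter_cons]
        simp only [hne]
        rw [← List.takeWhile_append_dropWhile (p := fun x => x.1 == u) (l := rest),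
          List.filter_append]
        have htw : (rest.takeWhile (fun x => x.1 == u)).filter (fun x => x.1 == g.1) = [] := by
          apply List.filter_eq_nil_iff.2
          intro z' hz'
          have := List.mem_takeWhile_imp hz'
          simp only [beq_iff_eq] at this ⊢
          intro hc; rw [this] at hc; exact hne (by simpa using hc)
        rw [htw, List.nil_append, List.takeWhile_append_dropWhile]
        simp
      rw [hfilter]

-- B's fold, looked up at u, is the counting loop over u's products
theorem pv_alt_fold_getD (l : List (String × String)) :
    ∀ (d : PySem.Dict String (PySem.Dict String Int)) (u : String),
    (l.foldl (fun d x => d.modify x.1 PySem.Dict.empty (fun c => c.modify x.2 0 (· + 1))) d).getD u PySem.Dict.empty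
      = ((l.filter (fun x => x.1 == u)).map (·.2)).foldl
          (fun c p => c.modify p 0 (· + 1)) (d.getD u PySem.Dict.empty) := by
  induction l with
  | nil => intro d u; simp
  | cons x t ih =>
    intro d u
    rw [List.foldl_cons, ih, List.filter_cons]
    by_cases hx : (x.1 == u) = true
    · have hxu : x.1 = u := by simpa using hx
      rw [if_pos hx, List.map_cons, List.foldl_cons,
        PySem.Dict.getD_modify, if_pos hxu.symm, hxu]
    · have hne : x.1 ≠ u := by simpa using hx
      rw [if_neg hx, PySem.Dict.getD_modify, if_neg (Ne.symm hne)]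

-- ===== VERDICT (by name: the statement is the Claim_ definition above) =====
theorem group_by_user_spec : Claim_equal_group_by_user := by
  intro cs _
  show group_by_user cs = group_by_user_alt cs
  have hpair := PySem.List.sorted_pairwise cs (fun x : String × String => x.1)
  set ss := PySem.List.sorted cs (fun x : String × String => x.1) with hss
  have hKlt := pv_runs_keys_sorted ss hpair
  have hKnodup : ((pvGroupRuns ss).map (·.1)).Nodup := hKlt.imp (fun h => ne_of_lt h)
  -- A's dict fold over the runs (fresh, strictly increasing keys) just appends
  have hA : group_by_user cs
      = (pvGroupRuns ss).map (fun g => (g.1, (PySem.Dict.counter g.2).items)) := by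
    simp only [group_by_user, ← hss]
    rw [PySem.Dict.items_foldl_insert_fresh (pvGroupRuns ss) (fun g => g.1)
      (fun g => (PySem.Dict.counter g.2).items) PySem.Dict.empty
      (fun a _ => rfl) hKnodup]
    rfl
  -- rewrite each run via stability: its products are cs filtered by the key
  have hAf : group_by_user cs = ((pvGroupRuns ss).map (·.1)).map
      (fun u => (u, (PySem.Dict.counter ((cs.filter (fun x => x.1 == u)).map (·.2))).items)) := by
    rw [hA, List.map_map]
    refine List.map_congr_left (fun g hg => ?_)
    have := pv_runs_products ss hpair g hg
    rw [hss] at this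
    rw [this, pv_sorted_filter_stable]
    rfl
  -- B's side
  set D := cs.foldl (fun d x => d.modify x.1 PySem.Dict.empty (fun c => c.modify x.2 0 (· + 1)))
    (PySem.Dict.empty : PySem.Dict String (PySem.Dict String Int)) with hD
  have hDkeys : D.keys = PySem.Set.ofList (cs.map (·.1)) := by
    rw [hD, PySem.Dict.keys_foldl_modify_key]
    simp [PySem.Set.ofList_eq_foldl, PySem.Set.update, PySem.Dict.keys_empty]
  have hDgetD : ∀ u, D.getD u PySem.Dict.empty
      = PySem.Dict.counter ((cs.filter (fun x => x.1 == u)).map (·.2)) := by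
    intro u
    rw [hD, pv_alt_fold_getD, PySem.Dict.getD_empty, PySem.Dict.counter_eq_foldl]
  have hB : group_by_user_alt cs = (PySem.List.sorted D.keys (fun u => u)).map
      (fun u => (u, (PySem.Dict.counter ((cs.filter (fun x => x.1 == u)).map (·.2))).items)) := by
    simp only [group_by_user_alt, ← hD]
    exact List.map_congr_left (fun u _ => by rw [hDgetD u])
  -- the two key lists coincide
  have hS := PySem.List.sorted_perm D.keys (fun u => u) false
  have hSnodup : (PySem.List.sorted D.keys (fun u => u)).Nodup := by
    rw [hS.nodup_iff, hDkeys]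
    exact PySem.Set.nodup_ofList _
  have hperm : ((pvGroupRuns ss).map (·.1)).Perm (PySem.List.sorted D.keys (fun u => u)) := by
    rw [List.perm_ext_iff_of_nodup hKnodup hSnodup]
    intro u
    have hcs : u ∈ ss.map (·.1) ↔ u ∈ cs.map (·.1) :=
      (List.Perm.map _ (PySem.List.sorted_perm cs (fun x : String × String => x.1) false)).mem_iff
    constructor
    · intro h
      rcases List.mem_map.1 h with ⟨g, hg, rfl⟩
      rw [hS.mem_iff, hDkeys, PySem.Set.mem_ofList]
      exact hcs.1 (pv_runs_keys_sub ss g hg)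
    · intro h
      rw [hS.mem_iff, hDkeys, PySem.Set.mem_ofList] at h
      exact pv_runs_keys_complete ss u (hcs.2 h)
  have hKS : (pvGroupRuns ss).map (·.1) = PySem.List.sorted D.keys (fun u => u) :=
    PySem.List.eq_of_perm_of_pairwise_le_of_injective (fun u => u) (fun a b h => h)
      hperm (hKlt.imp (fun h => le_of_lt h)) (PySem.List.sorted_pairwise _ _)
  rw [hAf, hB, hKS]
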